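-- pv_equiv track=rewrite | github.com/ts207/solo | project/events/contract_registry.py | _normalize_policy_token
-- ===== SOURCE A (Python) =====
-- def _normalize_policy_token(*parts: str) -> str:
--     tokens: list[str] = []
--     for part in parts:
--         token = str(part).strip().lower().replace("-", "_").replace(" ", "_")
--         token = "_".join(chunk for chunk in token.split("_") if chunk)
--         if token:
--             tokens.append(token)
--     return "_".join(tokens) or "parameterized_detector_policy"
-- ===== SOURCE B (Python) =====
-- def _normalize_policy_token(*parts: str) -> str:
--     # One-pass scanner: collect maximal runs of non-separator characters
--     # from every part into a single flat chunk list, then join once.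
--     chunks = []
--     for part in parts:
--         cur = ""
--         for ch in str(part).strip().lower():
--             if ch in "-_ ":
--                 if cur:
--                     chunks.append(cur)
--                     cur = ""
--             else:
--                 cur += ch
--         if cur:
--             chunks.append(cur)
--     return "_".join(chunks) or "parameterized_detector_policy"
-- ===== Notes on version B (the rewrite author's own statement) =====
-- stated objective: alternative
-- what changed: Replaces A's per-part replace/replace/split/filter/join-then-join-again chain with a single character-level scan that flattens maximal non-separator runs of all parts into one chunk list joined once.
import Mathlib
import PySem

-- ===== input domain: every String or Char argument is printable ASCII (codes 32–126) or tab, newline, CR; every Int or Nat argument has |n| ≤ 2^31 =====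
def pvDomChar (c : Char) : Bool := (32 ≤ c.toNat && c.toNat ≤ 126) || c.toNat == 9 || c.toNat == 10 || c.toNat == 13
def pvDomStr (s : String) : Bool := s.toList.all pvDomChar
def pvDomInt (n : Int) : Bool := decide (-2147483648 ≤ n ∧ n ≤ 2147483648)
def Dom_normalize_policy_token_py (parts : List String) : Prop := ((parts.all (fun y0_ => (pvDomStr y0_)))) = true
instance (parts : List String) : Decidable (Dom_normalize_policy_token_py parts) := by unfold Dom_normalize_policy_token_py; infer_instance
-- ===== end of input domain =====

-- B replaces A's per-part replace/split/filter/join-then-join chain with one character-level scan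
-- that flattens maximal non-separator runs into a single chunk list joined once (alternative decomposition, same cost).
-- Call convention: the harness passes the whole list as the single vararg, so Python's loop runs over the
-- one-element tuple (parts,) and str(part) is the list's repr; pvReprList models that str() (exact on Dom's chars).

def pvReprStr (s : String) : String :=
  let q : Char := if ('\'' ∈ s.toList ∧ '"' ∉ s.toList) then '"' else '\''
  String.ofList ([q] ++ s.toList.flatMap (fun c =>
    if c = '\\' then ['\\', '\\']
    else if c = q then ['\\', q]
    else if c = '\t' then ['\\', 't']
    else if c = '\n' then ['\\', 'n']
    else if c = '\r' then ['\\', 'r']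
    else [c]) ++ [q])

def pvReprList (xs : List String) : String :=
  String.ofList ('[' :: (PySem.Chars.join [',', ' '] (xs.map (fun s => (pvReprStr s).toList)) ++ [']']))

-- ===== PORT A =====
def normalize_policy_token_py (parts : List String) : String :=
  let tokens := [parts].foldl (fun tokens part =>
    let token := PySem.Str.replace (PySem.Str.replace (PySem.Str.lower (PySem.Str.strip (pvReprList part))) "-" "_") " " "_"
    let token := PySem.Str.join "_" (((PySem.Str.split? token "_").getD []).filter (fun chunk => chunk ≠ ""))
    if token ≠ "" then tokens ++ [token] else tokens) []
  let joined := PySem.Str.join "_" tokens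
  if joined = "" then "parameterized_detector_policy" else joined

-- ===== PORT B =====
-- exact hand port of Source B's character loop: state = (flat chunk list, current run of non-separator chars)
def pvIsSep (c : Char) : Bool := c == '-' || c == '_' || c == ' '

def pvScan (st : List (List Char) × List Char) (ch : Char) : List (List Char) × List Char :=
  if pvIsSep ch then (if st.2 ≠ [] then (st.1 ++ [st.2], []) else st)
  else (st.1, st.2 ++ [ch])

def normalize_policy_token_py_alt (parts : List String) : String :=
  let chunks := [parts].foldl (fun chunks part =>
    let st := (PySem.Chars.lower (PySem.Chars.strip (pvReprList part).toList)).foldl pvScan (chunks, [])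
    if st.2 ≠ [] then st.1 ++ [st.2] else st.1) []
  let joined := String.ofList (PySem.Chars.join ['_'] chunks)
  if joined = "" then "parameterized_detector_policy" else joined

-- ===== PRECONDITION & SPEC =====
def Spec_normalize_policy_token_py (parts : List String) (out : String) : Prop := out = normalize_policy_token_py_alt parts
instance (parts : List String) (out : String) : Decidable (Spec_normalize_policy_token_py parts out) := by unfold Spec_normalize_policy_token_py; infer_instance

-- ===== CLAIM (what is proved, stated in full; the proofs are below) =====
def Claim_equal_normalize_policy_token_py : Prop := ∀ (parts : List String), Dom_normalize_policy_token_py parts → Spec_normalize_policy_token_py parts (normalize_policy_token_py parts)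

-- ===== LEMMAS AND PROOFS =====

-- character substitution performed by A's two replace calls
def pvSubst (c : Char) : Char := if c = '-' ∨ c = ' ' then '_' else c

-- reference splitter: split a char list at every occurrence of p, `pre` = piece built so far
def pvMySplit (p : Char) (pre : List Char) : List Char → List (List Char)
  | [] => [pre]
  | c :: t => if c = p then pre :: pvMySplit p [] t else pvMySplit p (pre ++ [c]) t

-- A's per-part token, and B's per-part chunk list
def pvTokA (part : String) : String :=
  PySem.Str.join "_" (((PySem.Str.split? (PySem.Str.replace (PySem.Str.replace (PySem.Str.lower (PySem.Str.strip part)) "-" "_") " " "_") "_").getD []).filter (fun chunk => chunk ≠ ""))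

def pvChunksOf (part : String) : List (List Char) :=
  (pvMySplit '_' [] ((PySem.Chars.lower (PySem.Chars.strip part.toList)).map pvSubst)).filter (· ≠ [])

theorem pv_replace_go (a b : Char) :
    ∀ (fuel : Nat) (l acc : List Char), l.length ≤ fuel →
      PySem.Chars.replace.go [a] [b] fuel l acc
        = acc.reverse ++ l.map (fun c => if c = a then b else c) := by
  intro fuel
  induction fuel with
  | zero =>
    intro l acc h
    have : l = [] := List.eq_nil_of_length_eq_zero (Nat.le_zero.mp h)
    subst this
    simp [PySem.Chars.replace.go]
  | succ n ih =>
    intro l acc h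
    cases l with
    | nil => simp [PySem.Chars.replace.go]
    | cons c t =>
      rw [PySem.Chars.replace.go]
      by_cases hc : c = a
      · subst hc
        simp only [List.isPrefixOf, beq_self_eq_true, Bool.true_and, if_true,
          List.map_cons]
        rw [show List.drop [c].length (c :: t) = t by simp]
        rw [ih t _ (by simpa using h)]
        simp
      · have : ([a].isPrefixOf (c :: t)) = false := by
          simp [List.isPrefixOf, beq_iff_eq]
          intro h'; exact absurd h'.symm hc
        rw [this]
        simp only [Bool.false_eq_true, if_false]
        rw [ih t _ (by simpa using h)]
        simp [hc]


theorem pv_replace_single (a b : Char) (cs : List Char) :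
    PySem.Chars.replace cs [a] [b] = cs.map (fun c => if c = a then b else c) := by
  rw [PySem.Chars.replace]
  simp only [List.isEmpty_cons, Bool.false_eq_true, if_false]
  exact (pv_replace_go a b cs.length cs [] le_rfl).trans (by simp)


theorem pv_splitOn_go (p : Char) :
    ∀ (fuel : Nat) (l cur : List Char) (acc : List (List Char)), l.length < fuel →
      PySem.Chars.splitOn.go [p] fuel l cur acc
        = acc.reverse ++ pvMySplit p cur.reverse l := by
  intro fuel
  induction fuel with
  | zero => intro l cur acc h; exact absurd h (Nat.not_lt_zero _)
  | succ n ih =>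
    intro l cur acc h
    cases l with
    | nil => simp [PySem.Chars.splitOn.go, pvMySplit]
    | cons c t =>
      rw [PySem.Chars.splitOn.go]
      by_cases hc : c = p
      · subst hc
        have hp : ([c].isPrefixOf (c :: t)) = true := by simp [List.isPrefixOf]
        rw [hp]
        simp only [if_true, List.length_cons, List.drop_succ_cons]
        rw [show List.drop ([] : List Char).length t = t by simp]
        rw [ih t [] _ (by simpa using h)]
        simp [pvMySplit]
      · have hp : ([p].isPrefixOf (c :: t)) = false := by
          simp [List.isPrefixOf, beq_iff_eq]
          intro h'; exact absurd h'.symm hc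
        rw [hp]
        simp only [Bool.false_eq_true, if_false]
        rw [ih t (c :: cur) acc (by simpa using Nat.lt_of_succ_lt_succ h)]
        simp [pvMySplit, hc]


theorem pv_splitOn_single (p : Char) (cs : List Char) :
    PySem.Chars.splitOn cs [p] = pvMySplit p [] cs := by
  rw [PySem.Chars.splitOn]
  exact (pv_splitOn_go p (cs.length + 1) cs [] [] (by omega)).trans (by simp)


theorem pv_scan_eq (l : List Char) :
    ∀ (cur : List Char) (chunks : List (List Char)),
      (let st := l.foldl pvScan (chunks, cur);
        if st.2 ≠ [] then st.1 ++ [st.2] else st.1)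
        = chunks ++ (pvMySplit '_' cur (l.map pvSubst)).filter (· ≠ []) := by
  induction l with
  | nil =>
    intro cur chunks
    by_cases hc : cur = [] <;> simp [pvMySplit, hc]
  | cons c t ih =>
    intro cur chunks
    by_cases hs : pvIsSep c = true
    · have hs' : c = '-' ∨ c = '_' ∨ c = ' ' := by simpa [pvIsSep, or_assoc] using hs
      have hsub : pvSubst c = '_' := by
        rcases hs' with h | h | h <;> subst h <;> decide
      by_cases hc : cur = []
      · subst hc
        simp only [List.foldl_cons, pvScan, hs, if_true, ne_eq, not_true, if_false]
        have := ih [] chunks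
        simp only [List.map_cons, hsub, pvMySplit, if_pos rfl] at *
        simp [this]
      · simp only [List.foldl_cons, pvScan, hs, if_true, ne_eq, hc, not_false_iff, if_true]
        have := ih [] (chunks ++ [cur])
        simp only [List.map_cons, hsub, pvMySplit, if_pos rfl] at *
        simp [this, hc]
    · have hs' : ¬ c = '-' ∧ ¬ c = '_' ∧ ¬ c = ' ' := by
        have := hs; simp [pvIsSep] at this; tauto
      have hsub : pvSubst c = c := by simp [pvSubst, hs'.1, hs'.2.2]
      have hne : ¬ c = '_' := hs'.2.1
      simp only [List.foldl_cons, pvScan, hs, Bool.false_eq_true, if_false]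
      have := ih (cur ++ [c]) chunks
      simp only [List.map_cons, hsub, pvMySplit, hne, if_false] at *
      simpa using this


theorem pv_join_ne_nil (rs : List (List Char)) (hne : rs ≠ []) (h : ∀ x ∈ rs, x ≠ []) :
    PySem.Chars.join ['_'] rs ≠ [] := by
  cases rs with
  | nil => exact absurd rfl hne
  | cons r rest =>
    cases rest with
    | nil => simpa [PySem.Chars.join_singleton] using h r (by simp)
    | cons q qs =>
      rw [PySem.Chars.join_cons_cons]
      have := h r (by simp)
      cases r with
      | nil => exact absurd rfl this
      | cons a b => simp


theorem pv_map_filter (ts : List String) :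
    ((ts.filter (fun s => s ≠ "")).map String.toList) = (ts.map String.toList).filter (· ≠ []) := by
  induction ts with
  | nil => rfl
  | cons t ts ih =>
    by_cases h : t = ""
    · subst h; simpa using ih
    · have h' : t.toList ≠ [] := fun he => h (String.toList_eq_nil_iff.mp he)
      rw [List.filter_cons_of_pos (by simpa using h), List.map_cons, List.map_cons,
        List.filter_cons_of_pos (by simpa using h'), ih]


theorem pv_tokA_toList (part : String) :
    (pvTokA part).toList = PySem.Chars.join ['_'] (pvChunksOf part) := by
  have hX : (PySem.Str.replace (PySem.Str.replace (PySem.Str.lower (PySem.Str.strip part)) "-" "_") " " "_").toList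
      = (PySem.Chars.lower (PySem.Chars.strip part.toList)).map pvSubst := by
    rw [PySem.Str.toList_replace, PySem.Str.toList_replace, PySem.Str.toList_lower, PySem.Str.toList_strip]
    simp only [show ("-" : String).toList = ['-'] from rfl, show (" " : String).toList = [' '] from rfl,
      show ("_" : String).toList = ['_'] from rfl]
    rw [pv_replace_single '-' '_', pv_replace_single ' ' '_', List.map_map]
    refine List.map_congr_left (fun c _ => ?_)
    by_cases hc1 : c = '-' <;> by_cases hc2 : c = ' ' <;>
      simp [pvSubst, hc1, hc2, Function.comp]
  have hsplit : (PySem.Str.split? (PySem.Str.replace (PySem.Str.replace (PySem.Str.lower (PySem.Str.strip part)) "-" "_") " " "_") "_") ≠ none := by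
    intro he
    have := PySem.Str.split?_map (PySem.Str.replace (PySem.Str.replace (PySem.Str.lower (PySem.Str.strip part)) "-" "_") " " "_") "_"
    rw [he] at this
    simp [PySem.Chars.split?] at this
  obtain ⟨ts, hts⟩ := Option.ne_none_iff_exists'.mp hsplit
  have hmap : ts.map String.toList
      = PySem.Chars.splitOn ((PySem.Chars.lower (PySem.Chars.strip part.toList)).map pvSubst) ['_'] := by
    have h := PySem.Str.split?_map (PySem.Str.replace (PySem.Str.replace (PySem.Str.lower (PySem.Str.strip part)) "-" "_") " " "_") "_"
    rw [hts, hX, show ("_" : String).toList = ['_'] from rfl] at h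
    simp only [Option.map_some, PySem.Chars.split?, List.isEmpty_cons, Bool.false_eq_true,
      if_false, Option.some_inj] at h
    exact h
  rw [pvTokA, hts, Option.getD_some, PySem.Str.toList_join, pv_map_filter, hmap,
    pv_splitOn_single]
  rfl


theorem pv_joined_eq (s : String) :
    PySem.Str.join "_" (if pvTokA s ≠ "" then [pvTokA s] else [])
      = String.ofList (PySem.Chars.join ['_'] (pvChunksOf s)) := by
  have htok := pv_tokA_toList s
  have hmem : ∀ x ∈ pvChunksOf s, x ≠ [] := fun x hx => by simpa using List.of_mem_filter hx
  apply String.toList_injective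
  by_cases hc : pvTokA s = ""
  · have hchunks : pvChunksOf s = [] := by
      by_contra hne
      refine pv_join_ne_nil _ hne hmem ?_
      rw [← htok, hc]
      rfl
    rw [hc, hchunks]
    simp [PySem.Str.toList_join, PySem.Chars.join_nil]
  · rw [if_pos hc, PySem.Str.toList_join, List.map_cons, List.map_nil,
      show ("_" : String).toList = ['_'] from rfl, PySem.Chars.join_singleton, htok]
    simp

theorem pv_A_loop {α : Type} (tokA : α → String) (ps : List α) :
    ∀ acc, ps.foldl (fun tokens part => if tokA part ≠ "" then tokens ++ [tokA part] else tokens) acc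
      = acc ++ (ps.map tokA).filter (· ≠ "") := by
  induction ps with
  | nil => simp
  | cons p ps ih =>
    intro acc
    by_cases h : tokA p = ""
    · simp only [List.foldl_cons, h, ne_eq, not_true, if_false, List.map_cons]
      rw [List.filter_cons_of_neg (by simp [h]), ih]
    · simp only [List.foldl_cons, ne_eq, h, not_false_iff, if_true, List.map_cons]
      rw [List.filter_cons_of_pos (by simp [h]), ih]
      simp only [List.append_assoc, List.singleton_append]

theorem pv_B_loop (ps : List (List String)) :
    ∀ acc, ps.foldl (fun chunks part =>
      let st := (PySem.Chars.lower (PySem.Chars.strip (pvReprList part).toList)).foldl pvScan (chunks, []);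
      if st.2 ≠ [] then st.1 ++ [st.2] else st.1) acc
      = acc ++ ps.flatMap (fun part => pvChunksOf (pvReprList part)) := by
  induction ps with
  | nil => simp
  | cons p ps ih =>
    intro acc
    simp only [List.foldl_cons]
    rw [show (let st := (PySem.Chars.lower (PySem.Chars.strip (pvReprList p).toList)).foldl pvScan (acc, []);
        if st.2 ≠ [] then st.1 ++ [st.2] else st.1) = acc ++ pvChunksOf (pvReprList p) from pv_scan_eq _ [] acc,
      ih]
    simp [pvChunksOf]

theorem main_eq (parts : List String) :
    normalize_policy_token_py parts = normalize_policy_token_py_alt parts := by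
  have hA : ∀ acc, List.foldl (fun tokens part =>
      let token := PySem.Str.replace (PySem.Str.replace (PySem.Str.lower (PySem.Str.strip (pvReprList part))) "-" "_") " " "_"
      let token := PySem.Str.join "_" (((PySem.Str.split? token "_").getD []).filter (fun chunk => chunk ≠ ""))
      if token ≠ "" then tokens ++ [token] else tokens) acc [parts]
      = acc ++ (([parts]).map (fun part => pvTokA (pvReprList part))).filter (· ≠ "") :=
    fun acc => pv_A_loop (fun part : List String => pvTokA (pvReprList part)) [parts] acc
  rw [normalize_policy_token_py, normalize_policy_token_py_alt]
  simp only []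
  rw [hA [], pv_B_loop [parts] []]
  rw [List.nil_append, List.nil_append, List.map_cons, List.map_nil, List.flatMap_cons,
    List.flatMap_nil, List.append_nil]
  have hf : List.filter (fun x => decide (x ≠ "")) [pvTokA (pvReprList parts)]
      = (if pvTokA (pvReprList parts) ≠ "" then [pvTokA (pvReprList parts)] else []) := by
    by_cases hc : pvTokA (pvReprList parts) = ""
    · rw [List.filter_cons_of_neg (by simp [hc]), if_neg (by simp [hc]), List.filter_nil]
    · rw [List.filter_cons_of_pos (by simp [hc]), if_pos hc, List.filter_nil]
  rw [hf, pv_joined_eq]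

-- ===== VERDICT (by name: the statement is the Claim_ definition above) =====
theorem normalize_policy_token_py_spec : Claim_equal_normalize_policy_token_py :=
  fun parts _ => main_eq parts
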